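-- pv_equiv track=rewrite | github.com/Niicis/Crypto | OutilsCrypto.py | paquet
-- ===== SOURCE A (Python) =====
-- def codex(c) :
--     try :
--         c=str(c)
--         c=c[0].upper()
--     except : return -1
--     n=ord(c)-ord('A')
--     if(n>25 or n<0) : return -1
--     return n
--
-- def paquet(txt, paq=1) :
--     try :
--         txt=str(txt)
--         paq=int(paq)
--     except : return dict()
--     if(paq<0) : return dict()
--
--     res=dict()
--     n=len(txt)
--     i=0
--     nb_paq=-1
--     while(i<n) :
--         if(i%paq==0) :
--             nb_paq+=1
--             res[nb_paq]=0
--         x=codex(txt[i])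
--         if(x==-1) : return {}
--         res[nb_paq]=res[nb_paq]*100+x
--         i+=1
--
--     while(i%paq!=0) :
--         res[nb_paq]*=100
--         i+=1
--     return res
-- ===== SOURCE B (Python) =====
-- def codex(c):
--     try:
--         c = str(c)
--         c = c[0].upper()
--     except:
--         return -1
--     n = ord(c) - ord('A')
--     if n > 25 or n < 0:
--         return -1
--     return n
--
--
-- def paquet(txt, paq=1):
--     try:
--         txt = str(txt)
--         paq = int(paq)
--     except:
--         return dict()
--     if paq < 0:
--         return dict()
--     n = len(txt)
--     nb = -(-n // paq)          # ceil(n / paq); ZeroDivisionError when paq == 0, as in the original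
--     res = dict()
--     for k in range(nb):
--         chunk = txt[k * paq:(k + 1) * paq]
--         v = 0
--         for c in chunk:
--             x = codex(c)
--             if x == -1:
--                 return {}
--             v = v * 100 + x
--         res[k] = v * 100 ** (paq - len(chunk))
--     return res
-- ===== Notes on version B (the rewrite author's own statement) =====
-- stated objective: alternative
-- what changed: Replaces A's single index-stepping while-loop (boundary test i%paq==0, dict entry opened and mutated per character, unit-step padding loop) by an up-front ceil-division packet count, a per-packet loop over slices txt[k*paq:(k+1)*paq] folded into the value, and padding of the short final chunk by one multiplication with 100**(paq-len(chunk)).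
import Mathlib
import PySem

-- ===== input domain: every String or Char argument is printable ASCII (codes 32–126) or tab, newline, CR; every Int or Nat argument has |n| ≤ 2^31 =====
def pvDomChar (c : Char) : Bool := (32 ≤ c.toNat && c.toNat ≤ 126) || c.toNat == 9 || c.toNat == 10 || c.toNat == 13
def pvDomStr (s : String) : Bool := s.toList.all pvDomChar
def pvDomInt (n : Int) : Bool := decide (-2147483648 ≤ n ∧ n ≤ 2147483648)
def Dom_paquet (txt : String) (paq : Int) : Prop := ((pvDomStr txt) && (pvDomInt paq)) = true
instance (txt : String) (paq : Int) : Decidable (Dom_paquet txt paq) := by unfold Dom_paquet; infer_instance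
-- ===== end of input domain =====

-- B groups the text into base-100 packets by computing the packet count with a ceiling division and
-- folding each slice, instead of A's single index-stepping while-loop with a mutable dict and a
-- unit-step padding loop; same values everywhere A returns (paq = 0, where A raises, is excluded).

-- ===== PORT A =====
def codexA (c : Char) : Int :=
  let u := PySem.Chars.upperChar c          -- c[0].upper() on the one-character string txt[i]
  let n : Int := (u.toNat : Int) - 65       -- ord(c) - ord('A'), ord 'A' = 65
  if n > 25 ∨ n < 0 then -1 else n

-- the main while-loop: state (i, nb_paq, res); returns none where A does 'return {}'
def paqLoopA (paq : Int) : List Char → Int → Int → PySem.Dict Int Int →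
    Option (Int × Int × PySem.Dict Int Int)
  | [], i, nb, res => some (i, nb, res)
  | c :: rest, i, nb, res =>
    let nb' := if PySem.Int.mod i paq = 0 then nb + 1 else nb
    let res' := if PySem.Int.mod i paq = 0 then res.insert nb' 0 else res
    let x := codexA c
    if x = -1 then none
    else paqLoopA paq rest (i + 1) nb' (res'.insert nb' (res'.getD nb' 0 * 100 + x))

-- the trailing 'while i % paq != 0' padding loop; fuel paq.toNat bounds its < paq iterations
-- (for paq > 0; paq = 0 raises in Python and is outside Pre_paquet)
def padA (paq nb : Int) : Nat → Int → PySem.Dict Int Int → PySem.Dict Int Int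
  | 0, _, res => res
  | f + 1, i, res =>
    if PySem.Int.mod i paq = 0 then res
    else padA paq nb f (i + 1) (res.insert nb (res.getD nb 0 * 100))

def paquet (txt : String) (paq : Int) : List (Int × Int) :=
  if paq < 0 then []
  else
    match paqLoopA paq txt.toList 0 (-1) PySem.Dict.empty with
    | none => []
    | some (i, nb, res) => (padA paq nb paq.toNat i res).items

-- ===== PORT B =====
def codexB (c : Char) : Int :=
  let u := PySem.Chars.upperChar c
  let n : Int := (u.toNat : Int) - 65
  if n > 25 ∨ n < 0 then -1 else n

-- 'for c in chunk: ...' folding the chunk into v; none where B does 'return {}'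
def chunkValB : List Char → Int → Option Int
  | [], v => some v
  | c :: rest, v =>
    let x := codexB c
    if x = -1 then none else chunkValB rest (v * 100 + x)

-- 'for k in range(nb): ...' building res
def altLoopB (cs : List Char) (paq : Int) : List Int → PySem.Dict Int Int →
    Option (PySem.Dict Int Int)
  | [], res => some res
  | k :: ks, res =>
    let chunk := PySem.List.slice cs (some (k * paq)) (some ((k + 1) * paq))
    match chunkValB chunk 0 with
    | none => none
    | some v =>
      -- exponent paq - len(chunk) is ≥ 0 whenever this line is reached (paq > 0), so .toNat is exact
      altLoopB cs paq ks (res.insert k (v * 100 ^ (paq - (chunk.length : Int)).toNat))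

def paquet_alt (txt : String) (paq : Int) : List (Int × Int) :=
  if paq < 0 then []
  else
    let cs := txt.toList
    let n : Int := (cs.length : Int)
    let nb : Int := -(PySem.Int.floordiv (-n) paq)   -- -(-n // paq) = ceil(n / paq)
    match altLoopB cs paq (PySem.List.pyRange 0 nb 1) PySem.Dict.empty with
    | none => []
    | some res => res.items

-- ===== PRECONDITION & SPEC =====
-- Pre_ excludes exactly paq = 0, where A raises ZeroDivisionError (i % paq resp. -(-n // paq)).
def Pre_paquet (txt : String) (paq : Int) : Prop := paq ≠ 0
instance (txt : String) (paq : Int) : Decidable (Pre_paquet txt paq) := by unfold Pre_paquet; infer_instance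
def pvWitness_paquet : String × Int := ("ABCDE", 2)

def Spec_paquet (txt : String) (paq : Int) (out : List (Int × Int)) : Prop := out = paquet_alt txt paq
instance (txt : String) (paq : Int) (out : List (Int × Int)) : Decidable (Spec_paquet txt paq out) := by unfold Spec_paquet; infer_instance

-- ===== CLAIM (what is proved, stated in full; the proofs are below) =====
def Claim_equal_paquet : Prop := ∀ (txt : String) (paq : Int), Dom_paquet txt paq → Pre_paquet txt paq → Spec_paquet txt paq (paquet txt paq)

-- ===== LEMMAS AND PROOFS =====

def cLoop (p : Int) : List Char → Int → Int → Int → List (Int × Int) →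
    Option (Int × Int × Int × List (Int × Int))
  | [], i, nb, v, out => some (i, nb, v, out)
  | c :: rest, i, nb, v, out =>
    let x := codexB c
    if x = -1 then none
    else if PySem.Int.mod i p = 0 then cLoop p rest (i + 1) (nb + 1) x (out ++ [(nb, v)])
    else cLoop p rest (i + 1) nb (v * 100 + x) out

-- replay a list of (key, value) pairs into a dict

def applyOut (d : PySem.Dict Int Int) (L : List (Int × Int)) : PySem.Dict Int Int :=
  L.foldl (fun d q => d.insert q.1 q.2) d

-- chunk-by-chunk spec both sides are reduced to; pm + 1 = paq

def chunksV (pm : Nat) : List Char → Int → Option (List (Int × Int))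
  | [], _ => some []
  | c :: t, k =>
    match chunkValB (c :: t.take pm) 0 with
    | none => none
    | some v =>
      (chunksV pm (t.drop pm) (k + 1)).map
        (fun L => (k, v * 100 ^ (pm - (t.take pm).length)) :: L)
  termination_by cs => cs.length
  decreasing_by simp

theorem codexA_eq_codexB : codexA = codexB := rfl

theorem kp_mod (k p a : Int) : (k * p + a) % p = a % p := by
  rw [add_comm, mul_comm]
  exact Int.add_mul_emod_self_left a p k

theorem cLoop_out2 (p : Int) (cs : List Char) : ∀ (i nb v : Int) (out : List (Int × Int)),
    cLoop p cs i nb v out =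
      (cLoop p cs i nb v []).map (fun s => (s.1, s.2.1, s.2.2.1, out ++ s.2.2.2)) := by
  induction cs with
  | nil => intro i nb v out; simp [cLoop]
  | cons c rest ih =>
    intro i nb v out
    by_cases hx : codexB c = -1
    · simp [cLoop, hx]
    · by_cases hb : PySem.Int.mod i p = 0
      · simp only [cLoop, if_neg hx, if_pos hb]
        rw [ih _ _ _ (out ++ [(nb, v)]), ih _ _ _ ([] ++ [(nb, v)])]
        cases cLoop p rest (i+1) (nb+1) (codexB c) [] <;> simp
      · simp only [cLoop, if_neg hx, if_neg hb]
        exact ih _ _ _ out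

theorem bridgeA2 (p : Int) (cs : List Char) : ∀ (i nb v : Int) (d : PySem.Dict Int Int),
    paqLoopA p cs i nb (d.insert nb v) =
      (cLoop p cs i nb v []).map
        (fun s => (s.1, s.2.1, (applyOut d s.2.2.2).insert s.2.1 s.2.2.1)) := by
  induction cs with
  | nil => intro i nb v d; simp [paqLoopA, cLoop, applyOut]
  | cons c rest ih =>
    intro i nb v d
    by_cases hx : codexB c = -1
    · simp [paqLoopA, cLoop, codexA_eq_codexB, hx]
    · by_cases hb : PySem.Int.mod i p = 0
      · simp only [paqLoopA, cLoop, codexA_eq_codexB, if_neg hx, if_pos hb]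
        rw [PySem.Dict.getD_insert_self, PySem.Dict.insert_insert_self]
        have h0 : (0 : Int) * 100 + codexB c = codexB c := by ring
        rw [h0, ih (i+1) (nb+1) (codexB c) (d.insert nb v)]
        rw [cLoop_out2 p rest (i+1) (nb+1) (codexB c) ([] ++ [(nb, v)])]
        cases cLoop p rest (i+1) (nb+1) (codexB c) [] <;> simp [applyOut]
      · simp only [paqLoopA, cLoop, codexA_eq_codexB, if_neg hx, if_neg hb]
        rw [PySem.Dict.getD_insert_self, PySem.Dict.insert_insert_self]
        exact ih (i+1) nb (v*100 + codexB c) d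

theorem bridgePad2 (p : Int) (hp : 0 < p) (nb : Int) :
    ∀ (fuel : Nat) (i v : Int) (d : PySem.Dict Int Int),
      ((p - i % p) % p).toNat ≤ fuel →
      padA p nb fuel i (d.insert nb v) = d.insert nb (v * 100 ^ ((p - i % p) % p).toNat) := by
  intro fuel
  induction fuel with
  | zero =>
    intro i v d h
    have h0 : ((p - i % p) % p).toNat = 0 := Nat.le_zero.mp h
    simp only [padA]; rw [h0]; simp
  | succ f ih =>
    intro i v d h
    have hm := PySem.Int.mod_eq_emod_of_pos (a := i) hp
    by_cases hb : i % p = 0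
    · have h0 : ((p - i % p) % p).toNat = 0 := by
        rw [hb]; simp
      simp [padA, hm, hb]
    · have hr0 : 0 ≤ i % p := Int.emod_nonneg i (by omega)
      have hr1 : i % p < p := Int.emod_lt_of_pos i hp
      have hp2 : 2 ≤ p := by
        rcases lt_or_ge p 2 with h2 | h2
        · interval_cases p
          · omega
        · exact h2
      have hstep : (i + 1) % p = if i % p + 1 = p then 0 else i % p + 1 := by
        rw [Int.add_emod]
        have h1 : (1 : Int) % p = 1 := Int.emod_eq_of_lt (by omega) (by omega)
        rw [h1]
        split
        · rename_i he
          rw [he]; simp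
        · exact Int.emod_eq_of_lt (by omega) (by omega)
      have he : (p - i % p) % p = p - i % p := Int.emod_eq_of_lt (by omega) (by omega)
      have he' : (p - (i + 1) % p) % p = p - i % p - 1 := by
        rw [hstep]
        split
        · rename_i hcase
          have : p - (0:Int) = p := by ring
          simp [this]
          omega
        · have harith : p - (i % p + 1) = p - i % p - 1 := by ring
          rw [harith]
          exact Int.emod_eq_of_lt (by omega) (by omega)
      simp only [padA, hm, hb, if_neg, not_false_iff]
      rw [PySem.Dict.getD_insert_self, PySem.Dict.insert_insert_self]
      rw [ih (i + 1) (v * 100) d (by omega)]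
      congr 1
      rw [he', he]
      have hx : (p - i % p).toNat = (p - i % p - 1).toNat + 1 := by omega
      rw [hx, pow_succ]
      ring

theorem cLoop_inner2 (p : Int) (hp : 0 < p) :
    ∀ (t rest : List Char) (i nb v : Int) (out : List (Int × Int)),
      (∀ m : Nat, m < t.length → (i + (m : Int)) % p ≠ 0) →
      cLoop p (t ++ rest) i nb v out =
        (match chunkValB t v with
        | none => none
        | some w => cLoop p rest (i + (t.length : Int)) nb w out) := by
  intro t
  induction t with
  | nil => intro rest i nb v out h; simp [chunkValB]
  | cons c t' ih =>
    intro rest i nb v out h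
    have hb : i % p ≠ 0 := by
      have := h 0 (by simp)
      simpa using this
    have hmod : PySem.Int.mod i p = i % p := PySem.Int.mod_eq_emod_of_pos hp
    by_cases hx : codexB c = -1
    · simp [cLoop, chunkValB, hx]
    · simp only [List.cons_append, cLoop, if_neg hx, hmod, if_neg hb, chunkValB]
      rw [ih rest (i+1) nb (v * 100 + codexB c) out]
      · have hl : i + ((c :: t').length : Int) = (i + 1) + (t'.length : Int) := by
          simp; ring
        rw [hl]
      · intro m hm
        have := h (m + 1) (by simpa using Nat.succ_lt_succ hm)
        have hcast : i + ((m + 1 : Nat) : Int) = i + 1 + (m : Int) := by push_cast; ring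
        rw [hcast] at this
        exact this

def wrapFin (p : Int) (r : Option (Int × Int × Int × List (Int × Int))) :
    Option (List (Int × Int)) :=
  r.map (fun s => s.2.2.2 ++ [(s.2.1, s.2.2.1 * 100 ^ ((p - s.1 % p) % p).toNat)])

theorem outerA2 (p : Int) (hp : 0 < p) (pm : Nat) (hpm : p = (pm : Int) + 1) :
    ∀ (cs : List Char) (k v : Int) (out : List (Int × Int)),
      wrapFin p (cLoop p cs (k * p) (k - 1) v out) =
        (chunksV pm cs k).map (fun L => out ++ [(k - 1, v)] ++ L) := by
  intro cs
  induction hn : cs.length using Nat.strong_induction_on generalizing cs with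
  | _ n ihn =>
  intro k v out
  match cs with
  | [] =>
    simp only [cLoop, chunksV, wrapFin, Option.map_some]
    have hmod : (k * p) % p = 0 := Int.mul_emod_left k p
    rw [hmod]
    simp
  | c :: t =>
    have hbdry : PySem.Int.mod (k * p) p = 0 := by
      rw [PySem.Int.mod_eq_emod_of_pos hp]; exact Int.mul_emod_left k p
    by_cases hx : codexB c = -1
    · simp [cLoop, chunksV, chunkValB, hx, wrapFin]
    · simp only [cLoop, if_neg hx, hbdry, if_pos, chunksV, chunkValB]
      have hsplit : t = t.take pm ++ t.drop pm := (List.take_append_drop pm t).symm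
      have h0x : (0 : Int) * 100 + codexB c = codexB c := by ring
      rw [h0x]
      have hk1' : k - 1 + 1 = k := by ring
      rw [hk1']
      conv_lhs => rw [hsplit]
      rw [cLoop_inner2 p hp (t.take pm) (t.drop pm) (k * p + 1) k (codexB c)
            (out ++ [(k - 1, v)]) ?side]
      case side =>
        intro m hm
        have hmlen : m < pm := lt_of_lt_of_le hm (by simp)
        have : k * p + 1 + (m : Int) = k * p + (1 + (m : Int)) := by ring
        rw [this, kp_mod]
        rw [Int.emod_eq_of_lt (by omega) (by omega)]
        omega
      cases hcv : chunkValB (t.take pm) (codexB c) with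
      | none => simp [wrapFin]
      | some w =>
        simp only
        by_cases hlen : pm ≤ t.length
        · -- full chunk
          have hL : ((t.take pm).length : Int) = (pm : Int) := by
            simp [List.length_take, Nat.min_eq_left hlen]
          have hi : k * p + 1 + ((t.take pm).length : Int) = (k + 1) * p := by
            rw [hL, hpm]; ring
          rw [hi]
          have hrec := ihn (t.drop pm).length (by rw [← hn]; simp) (t.drop pm) rfl (k + 1) w
              (out ++ [(k - 1, v)])
          have hk1 : (k + 1 : Int) - 1 = k := by ring
          rw [hk1] at hrec
          rw [hrec]
          have hexp : pm - (t.take pm).length = 0 := by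
            simp [List.length_take]; omega
          rw [hexp]
          cases chunksV pm (t.drop pm) (k + 1) <;> simp
        · -- short final chunk
          have hts : t.take pm = t := List.take_of_length_le (by omega)
          have htd : t.drop pm = [] := List.drop_eq_nil_of_le (by omega)
          rw [htd]
          simp only [chunksV, Option.map_some]
          simp only [cLoop, wrapFin, Option.map_some]
          have hi' : (k * p + 1 + ((t.take pm).length : Int)) % p = 1 + (t.length : Int) := by
            rw [hts]
            have : k * p + 1 + (t.length : Int) = k * p + (1 + (t.length : Int)) := by ring
            rw [this, kp_mod]
            exact Int.emod_eq_of_lt (by omega) (by omega)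
          rw [hi']
          have hexp2 : ((p - (1 + (t.length : Int))) % p).toNat = pm - (t.take pm).length := by
            rw [hts]
            rw [Int.emod_eq_of_lt (by omega) (by omega)]
            omega
          rw [hexp2]

theorem applyOut_items2 (L : List (Int × Int)) :
    ∀ (d : PySem.Dict Int Int), (∀ a ∈ L.map Prod.fst, d.contains a = false) →
      (L.map Prod.fst).Pairwise (· ≠ ·) →
      (applyOut d L).items = d.items ++ L := by
  induction L with
  | nil => intro d _ _; simp [applyOut]
  | cons q L ih =>
    intro d hc hp
    have hq : d.contains q.1 = false := hc q.1 (by simp)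
    have hstep : applyOut d (q :: L) = applyOut (d.insert q.1 q.2) L := rfl
    rw [hstep, ih (d.insert q.1 q.2) ?cc ?pp]
    · rw [PySem.Dict.items_insert_of_not_contains d q.2 hq]
      simp
    case cc =>
      intro a ha
      rw [PySem.Dict.contains_insert]
      rw [List.map_cons] at hp
      have hne : a ≠ q.1 := fun h => (List.pairwise_cons.mp hp).1 a ha h.symm
      simp [hne, hc a (by simp [ha])]
    case pp =>
      rw [List.map_cons] at hp
      exact (List.pairwise_cons.mp hp).2

theorem chunksV_keys2 (pm : Nat) :
    ∀ (cs : List Char) (k : Int) (L : List (Int × Int)),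
      chunksV pm cs k = some L →
      (∀ a ∈ L.map Prod.fst, k ≤ a) ∧ (L.map Prod.fst).Pairwise (· < ·) := by
  intro cs
  induction hn : cs.length using Nat.strong_induction_on generalizing cs with
  | _ n ihn =>
  intro k L hL
  match cs with
  | [] =>
    simp [chunksV] at hL
    subst hL; simp
  | c :: t =>
    simp only [chunksV] at hL
    cases hcv : chunkValB (c :: t.take pm) 0 with
    | none => rw [hcv] at hL; simp at hL
    | some v =>
      rw [hcv] at hL
      cases hrec : chunksV pm (t.drop pm) (k + 1) with
      | none => rw [hrec] at hL; simp at hL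
      | some L' =>
        rw [hrec] at hL
        simp at hL
        obtain ⟨hall, hpair⟩ := ihn (t.drop pm).length (by rw [← hn]; simp) (t.drop pm) rfl (k+1) L' hrec
        subst hL
        constructor
        · intro a ha
          simp at ha
          rcases ha with ha | ha
          · omega
          · have := hall a (by simpa using ha); omega
        · simp only [List.map_cons, List.pairwise_cons]
          exact ⟨fun a ha => by have := hall a ha; omega, hpair⟩

theorem cLoop_keys2 (p : Int) (cs : List Char) :
    ∀ (i nb v : Int) (out : List (Int × Int)) s',
      cLoop p cs i nb v out = some s' →
      (∀ a ∈ out.map Prod.fst, a < nb) → (out.map Prod.fst).Pairwise (· < ·) →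
      (∀ a ∈ s'.2.2.2.map Prod.fst, a < s'.2.1) ∧ (s'.2.2.2.map Prod.fst).Pairwise (· < ·) := by
  induction cs with
  | nil =>
    intro i nb v out s' hs h1 h2
    simp [cLoop] at hs
    subst hs
    exact ⟨h1, h2⟩
  | cons c rest ih =>
    intro i nb v out s' hs h1 h2
    by_cases hx : codexB c = -1
    · simp [cLoop, hx] at hs
    · by_cases hb : PySem.Int.mod i p = 0
      · simp only [cLoop, if_neg hx, if_pos hb] at hs
        refine ih (i+1) (nb+1) (codexB c) (out ++ [(nb, v)]) s' hs ?_ ?_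
        · intro a ha
          simp at ha
          rcases ha with ha | ha
          · have := h1 a (by simpa using ha); omega
          · omega
        · rw [List.map_append]
          apply List.pairwise_append.mpr
          refine ⟨h2, by simp, ?_⟩
          intro a ha b hb'
          simp at hb'
          subst hb'
          exact h1 a ha
      · simp only [cLoop, if_neg hx, if_neg hb] at hs
        exact ih (i+1) nb (v * 100 + codexB c) out s' hs h1 h2

theorem outerB2 (p : Int) (hp : 0 < p) (pm : Nat) (hpm : p = (pm : Int) + 1)
    (cs : List Char) (nbT : Int)
    (hnb : (nbT - 1) * p < (cs.length : Int) ∧ (cs.length : Int) ≤ nbT * p) :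
    ∀ (k : Int), 0 ≤ k → ∀ (d : PySem.Dict Int Int),
      altLoopB cs p (PySem.List.pyRange k nbT 1) d =
        (chunksV pm (cs.drop (k * p).toNat) k).map (fun L => applyOut d L) := by
  intro k
  induction hm : (nbT - k).toNat using Nat.strong_induction_on generalizing k with
  | _ m ihm =>
  intro hk d
  by_cases hlt : k < nbT
  · rw [PySem.List.pyRange_one_cons hlt]
    have hkp0 : (0:Int) ≤ k * p := mul_nonneg hk hp.le
    have hk1p : (k + 1) * p = k * p + p := by ring
    have hslice : PySem.List.slice cs (some (k * p)) (some ((k + 1) * p)) =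
        (cs.drop (k * p).toNat).take p.toNat := by
      rw [PySem.List.slice_toNat cs hkp0 (by omega)]
      congr 1
      omega
    have hsuffne : cs.drop (k * p).toNat ≠ [] := by
      have h1 : k * p ≤ (nbT - 1) * p := mul_le_mul_of_nonneg_right (by omega) hp.le
      have h2 : k * p < (cs.length : Int) := lt_of_le_of_lt h1 hnb.1
      intro hnil
      have := List.drop_eq_nil_iff.mp hnil
      omega
    cases hsuff : cs.drop (k * p).toNat with
    | nil => exact absurd hsuff hsuffne
    | cons c t =>
      have hpt : p.toNat = pm + 1 := by omega
      have hchunk2 : List.take p.toNat (c :: t) = c :: t.take pm := by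
        rw [hpt]; rfl
      simp only [altLoopB, hslice, hsuff, chunksV, hchunk2]
      cases hcv : chunkValB (c :: t.take pm) 0 with
      | none => rfl
      | some v =>
        simp only
        have hdropstep : cs.drop ((k + 1) * p).toNat = t.drop pm := by
          have h1 : ((k+1) * p).toNat = (k * p).toNat + p.toNat := by omega
          rw [h1, ← List.drop_drop, hsuff, hpt]
          rfl
        have hrec := ihm (nbT - (k+1)).toNat (by omega) (k+1) rfl (by omega)
            (d.insert k (v * 100 ^ (p - (((c :: t.take pm).length : Nat) : Int)).toNat))
        rw [hrec, hdropstep]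
        have hexp : (p - (((c :: t.take pm).length : Nat) : Int)).toNat = pm - (t.take pm).length := by
          simp [List.length_take]
          omega
        rw [hexp]
        cases chunksV pm (t.drop pm) (k + 1) <;> simp [applyOut]
  · have hnil : PySem.List.pyRange k nbT 1 = [] := PySem.List.pyRange_one_eq_nil (by omega)
    have hdrop : cs.drop (k * p).toNat = [] := by
      apply List.drop_eq_nil_iff.mpr
      have h1 : nbT * p ≤ k * p := mul_le_mul_of_nonneg_right (by omega) hp.le
      omega
    rw [hnil, hdrop]
    simp [altLoopB, chunksV, applyOut]

-- ===== VERDICT (by name: the statement is the Claim_ definition above) =====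
theorem paquet_spec : Claim_equal_paquet := by
  unfold Claim_equal_paquet
  intro txt paq _ hpre
  unfold Spec_paquet
  unfold Pre_paquet at hpre
  by_cases hneg : paq < 0
  · simp [paquet, paquet_alt, hneg]
  · have hp : 0 < paq := by omega
    have hpm : paq = ((paq.toNat - 1 : Nat) : Int) + 1 := by omega
    set pm : Nat := paq.toNat - 1 with hpmdef
    set cs : List Char := txt.toList with hcs
    set nbT : Int := -(PySem.Int.floordiv (-((cs.length : Nat) : Int)) paq) with hnbT
    have hnb1 : (nbT - 1) * paq < ((cs.length : Nat) : Int) ∧ ((cs.length : Nat) : Int) ≤ nbT * paq :=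
      (PySem.Int.neg_floordiv_neg_eq_iff_of_pos hp).mp rfl
    have hOB := outerB2 paq hp pm hpm cs nbT hnb1 0 le_rfl PySem.Dict.empty
    simp only [zero_mul, Int.toNat_zero, List.drop_zero] at hOB
    have hB : paquet_alt txt paq = (match chunksV pm cs 0 with | none => [] | some L => L) := by
      unfold paquet_alt
      rw [if_neg hneg]
      simp only [← hcs, ← hnbT]
      rw [hOB]
      cases hCV : chunksV pm cs 0 with
      | none => rfl
      | some L =>
        simp only [Option.map_some]
        obtain ⟨hall, hpair⟩ := chunksV_keys2 pm cs 0 L hCV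
        rw [applyOut_items2 L PySem.Dict.empty (fun a _ => PySem.Dict.contains_empty a)
          (hpair.imp (fun h => ne_of_lt h))]
        rfl
    rw [hB]
    have hmod0 : PySem.Int.mod 0 paq = 0 := by
      rw [PySem.Int.mod_eq_emod_of_pos hp]; exact Int.zero_emod paq
    cases hcs' : cs with
    | nil =>
      have hA : paquet txt paq = [] := by
        unfold paquet
        rw [if_neg hneg, ← hcs, hcs']
        simp only [paqLoopA]
        cases hf : paq.toNat with
        | zero => omega
        | succ f => simp [padA, hmod0]; rfl
      rw [hA]
      simp [chunksV]
    | cons c t =>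
      by_cases hx : codexB c = -1
      · have hA : paquet txt paq = [] := by
          unfold paquet
          rw [if_neg hneg, ← hcs, hcs']
          simp [paqLoopA, codexA_eq_codexB, hx]
        rw [hA]
        simp [chunksV, chunkValB, hx]
      · have hfirst : paqLoopA paq (c :: t) 0 (-1) PySem.Dict.empty
            = paqLoopA paq t 1 0 (PySem.Dict.empty.insert 0 (codexB c)) := by
          simp only [paqLoopA, codexA_eq_codexB, hmod0, if_pos, if_neg hx]
          norm_num
          rw [PySem.Dict.insert_insert_self]
        have hA2 := bridgeA2 paq t 1 0 (codexB c) PySem.Dict.empty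
        have hc1 : cLoop paq (c :: t) 0 (-1) 0 [] =
            (cLoop paq t 1 0 (codexB c) []).map
              (fun s => (s.1, s.2.1, s.2.2.1, [((-1 : Int), (0 : Int))] ++ s.2.2.2)) := by
          simp only [cLoop, if_neg hx, hmod0, if_pos]
          norm_num
          exact cLoop_out2 paq t 1 0 (codexB c) [((-1 : Int), (0 : Int))]
        have hW := outerA2 paq hp pm hpm (c :: t) 0 0 []
        simp only [zero_mul, zero_sub, List.nil_append] at hW
        rw [hc1] at hW
        cases hS : cLoop paq t 1 0 (codexB c) [] with
        | none =>
          have hA : paquet txt paq = [] := by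
            unfold paquet
            rw [if_neg hneg, ← hcs, hcs', hfirst, hA2, hS]
            rfl
          rw [hS] at hW
          simp only [Option.map_none, wrapFin] at hW
          cases hCV : chunksV pm (c :: t) 0 with
          | none => rw [hA]
          | some L => rw [hCV] at hW; simp at hW
        | some s' =>
          obtain ⟨i', nb', v', out'⟩ := s'
          have hekey := cLoop_keys2 paq t 1 0 (codexB c) [] (i', nb', v', out') hS
            (by simp) (by simp)
          have hebound : 0 ≤ (paq - i' % paq) % paq ∧ (paq - i' % paq) % paq < paq :=
            ⟨Int.emod_nonneg _ (by omega), Int.emod_lt_of_pos _ hp⟩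
          have hA : paquet txt paq =
              out' ++ [(nb', v' * 100 ^ ((paq - i' % paq) % paq).toNat)] := by
            unfold paquet
            rw [if_neg hneg, ← hcs, hcs', hfirst, hA2, hS]
            simp only [Option.map_some]
            rw [bridgePad2 paq hp nb' paq.toNat i' v' (applyOut PySem.Dict.empty out')
              (by omega)]
            have happ : (applyOut PySem.Dict.empty out').insert nb'
                (v' * 100 ^ ((paq - i' % paq) % paq).toNat)
                = applyOut PySem.Dict.empty
                    (out' ++ [(nb', v' * 100 ^ ((paq - i' % paq) % paq).toNat)]) := by
              simp [applyOut]
            rw [happ]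
            rw [applyOut_items2 _ PySem.Dict.empty (fun a _ => PySem.Dict.contains_empty a) ?pw]
            · rfl
            case pw =>
              rw [List.map_append]
              apply List.pairwise_append.mpr
              refine ⟨(hekey.2).imp (fun h => ne_of_lt h), by simp, ?_⟩
              intro a ha b hb
              simp at hb
              subst hb
              exact ne_of_lt (hekey.1 a ha)
          rw [hS] at hW
          simp only [Option.map_some, wrapFin] at hW
          cases hCV : chunksV pm (c :: t) 0 with
          | none => rw [hCV] at hW; simp at hW
          | some L =>
            rw [hCV] at hW
            simp at hW
            rw [hA]
            simp only
            have hfix : (paq - i' % paq) % paq = -(i' % paq) % paq := by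
              have h1 : paq - i' % paq = 1 * paq + -(i' % paq) := by ring
              rw [h1, kp_mod]
            rw [hfix]
            exact hW
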